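-- pv_equiv track=rewrite | github.com/NISHANTTMAURYA/mummy | .history/excel_to_word_20250516225053.py | parse_month_field_columns
-- ===== SOURCE A (Python) =====
-- def parse_month_field_columns(header_row, field_row):
--     """Return a dict: {month: {field: col_idx}} for each month and field in the CSV."""
--     month_field_map = {}
--     current_month = None
--     month_start_idx = None
--
--     # Skip the first two columns (SR.NO. and INITIALS)
--     for idx, (month_cell, field_cell) in enumerate(zip(header_row[2:], field_row[2:]), start=2):
--         # If the month cell is not empty, update current_month
--         if month_cell.strip():
--             current_month = month_cell.strip().upper()
--             if current_month not in month_field_map: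
--                 month_field_map[current_month] = {}
--                 month_start_idx = idx
--
--         # Only map if we have a current_month and a valid field
--         if current_month and month_start_idx is not None:
--             field = field_cell.strip().upper()
--             if field == 'ALOTTED':
--                 month_field_map[current_month]['ALLOTTED'] = idx
--             elif field == 'ENGAGED':
--                 month_field_map[current_month]['ENGAGED'] = idx
--             elif field == 'GAP':
--                 month_field_map[current_month]['GAP'] = idx
--
--     return month_field_map
-- ===== SOURCE B (Python) =====
-- _FIELDS = {'ALOTTED': 'ALLOTTED', 'ENGAGED': 'ENGAGED', 'GAP': 'GAP'}
--
-- def parse_month_field_columns(header_row, field_row):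
--     """Return a dict: {month: {field: col_idx}} for each month and field in the CSV."""
--     # Pass 1: forward-fill the month for every column after the first two.
--     resolved = []
--     month = None
--     for cell in header_row[2:]:
--         if cell.strip():
--             month = cell.strip().upper()
--         resolved.append(month)
--     # Pass 2: walk the field row alongside the resolved months.
--     month_field_map = {}
--     for idx, (month, field_cell) in enumerate(zip(resolved, field_row[2:]), start=2):
--         if month is None:
--             continue
--         if month not in month_field_map:
--             month_field_map[month] = {}
--         canonical = _FIELDS.get(field_cell.strip().upper())
--         if canonical is not None:
--             month_field_map[month][canonical] = idx
--     return month_field_map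
-- ===== Notes on version B (the rewrite author's own statement) =====
-- stated objective: alternative
-- what changed: A threads a current_month/month_start_idx state machine through one combined scan; B first forward-fills a resolved-month list over the header columns, then a second pass zips it with the field row and uses a canonical-field lookup table instead of A's if/elif chain and start-index bookkeeping.
import Mathlib
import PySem

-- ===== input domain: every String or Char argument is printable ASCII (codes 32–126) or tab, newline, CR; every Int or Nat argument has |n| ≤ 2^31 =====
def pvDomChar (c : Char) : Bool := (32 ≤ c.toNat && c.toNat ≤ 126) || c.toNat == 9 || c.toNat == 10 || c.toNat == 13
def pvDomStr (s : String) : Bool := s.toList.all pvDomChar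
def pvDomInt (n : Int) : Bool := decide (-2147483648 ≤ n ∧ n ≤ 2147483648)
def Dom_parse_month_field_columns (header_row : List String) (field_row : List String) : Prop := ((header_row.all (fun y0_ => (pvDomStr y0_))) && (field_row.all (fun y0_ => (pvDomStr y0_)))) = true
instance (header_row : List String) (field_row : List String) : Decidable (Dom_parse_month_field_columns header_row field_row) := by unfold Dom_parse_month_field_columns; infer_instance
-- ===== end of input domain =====

-- B replaces A's one-pass current_month/month_start_idx state machine by a forward-fill pass
-- resolving the month of every column followed by a second pass with a canonical-field lookup
-- table; same cost, proven equal return value ('alternative' objective).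

-- ===== PORT A =====
-- A's field-assignment if/elif chain.  Python writes month_field_map[current_month][k] = idx
-- with current_month always a present key (guaranteed by the loop); Dict.modify with default
-- Dict.empty is exact there.
def pvSetField (map : PySem.Dict String (PySem.Dict String Int)) (m f : String) (idx : Int) :
    PySem.Dict String (PySem.Dict String Int) :=
  if f = "ALOTTED" then map.modify m PySem.Dict.empty (fun d => d.insert "ALLOTTED" idx)
  else if f = "ENGAGED" then map.modify m PySem.Dict.empty (fun d => d.insert "ENGAGED" idx)
  else if f = "GAP" then map.modify m PySem.Dict.empty (fun d => d.insert "GAP" idx)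
  else map

-- one iteration of A's loop; state = (month_field_map, current_month, month_start_idx)
def pvAStep (st : PySem.Dict String (PySem.Dict String Int) × Option String × Option Int)
    (p : Int × String × String) :
    PySem.Dict String (PySem.Dict String Int) × Option String × Option Int :=
  let st1 :=
    if PySem.Str.strip p.2.1 ≠ "" then
      let m := PySem.Str.upper (PySem.Str.strip p.2.1)
      if st.1.contains m then (st.1, some m, st.2.2)
      else (st.1.insert m PySem.Dict.empty, some m, some p.1)
    else st
  -- 'if current_month and month_start_idx is not None' (string truthiness = nonempty)
  match st1.2.1, st1.2.2 with
  | some m, some _ =>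
      if m = "" then st1
      else (pvSetField st1.1 m (PySem.Str.upper (PySem.Str.strip p.2.2)) p.1, st1.2.1, st1.2.2)
  | _, _ => st1

def parse_month_field_columns (header_row : List String) (field_row : List String) :
    List (String × List (String × Int)) :=
  let pairs := PySem.List.enumerate
    ((PySem.List.slice header_row (some 2) none).zip (PySem.List.slice field_row (some 2) none)) 2
  let st := pairs.foldl pvAStep (PySem.Dict.empty, none, none)
  st.1.items.map (fun p => (p.1, p.2.items))

-- ===== PORT B =====
-- Source B's _FIELDS dict literal
def pvFields : PySem.Dict String String :=
  PySem.Dict.mk [("ALOTTED", "ALLOTTED"), ("ENGAGED", "ENGAGED"), ("GAP", "GAP")]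

-- pass 1: forward-fill the month for every column after the first two
def pvResolve : List String → Option String → List (Option String)
  | [], _ => []
  | c :: rest, cur =>
    let cur' := if PySem.Str.strip c ≠ "" then some (PySem.Str.upper (PySem.Str.strip c)) else cur
    cur' :: pvResolve rest cur'

-- pass 2, one iteration: p = (idx, (resolved month, field cell))
def pvBStep (map : PySem.Dict String (PySem.Dict String Int))
    (p : Int × Option String × String) : PySem.Dict String (PySem.Dict String Int) :=
  match p.2.1 with
  | none => map
  | some m =>
    let map1 := if map.contains m then map else map.insert m PySem.Dict.empty
    match pvFields.get? (PySem.Str.upper (PySem.Str.strip p.2.2)) with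
    | some c => map1.modify m PySem.Dict.empty (fun d => d.insert c p.1)
    | none => map1

def parse_month_field_columns_alt (header_row : List String) (field_row : List String) :
    List (String × List (String × Int)) :=
  let resolved := pvResolve (PySem.List.slice header_row (some 2) none) none
  let st := (PySem.List.enumerate (resolved.zip (PySem.List.slice field_row (some 2) none)) 2).foldl
    pvBStep PySem.Dict.empty
  st.items.map (fun p => (p.1, p.2.items))

-- ===== PRECONDITION & SPEC =====
def Spec_parse_month_field_columns (header_row : List String) (field_row : List String) (out : List (String × List (String × Int))) : Prop := out = parse_month_field_columns_alt header_row field_row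
instance (header_row : List String) (field_row : List String) (out : List (String × List (String × Int))) : Decidable (Spec_parse_month_field_columns header_row field_row out) := by unfold Spec_parse_month_field_columns; infer_instance

-- ===== CLAIM (what is proved, stated in full; the proofs are below) =====
def Claim_equal_parse_month_field_columns : Prop := ∀ (header_row : List String) (field_row : List String), Dom_parse_month_field_columns header_row field_row → Spec_parse_month_field_columns header_row field_row (parse_month_field_columns header_row field_row)

-- ===== LEMMAS AND PROOFS =====

-- invariant of A's loop state
def pvInv (map : PySem.Dict String (PySem.Dict String Int)) (cur : Option String)
    (mst : Option Int) : Prop :=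
  match cur with
  | none => map = PySem.Dict.empty ∧ mst = none
  | some m => m ≠ "" ∧ map.contains m = true ∧ mst.isSome = true

theorem pvUpper_ne_empty (s : String) (h : s ≠ "") : PySem.Str.upper s ≠ "" := by
  intro hc
  apply h
  have h2 := congrArg String.toList hc
  simp [PySem.Str.toList_upper, PySem.Chars.upper] at h2
  exact String.toList_inj.mp (by simp [h2])

theorem pvContains_setField (map : PySem.Dict String (PySem.Dict String Int)) (m f : String)
    (idx : Int) (m' : String) (h : map.contains m' = true) :
    (pvSetField map m f idx).contains m' = true := by
  unfold pvSetField
  split_ifs <;> simp [PySem.Dict.contains_modify, h]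

theorem pvField_eq (map : PySem.Dict String (PySem.Dict String Int)) (m : String) (idx : Int)
    (f : String) :
    (match pvFields.get? f with
     | some c => map.modify m PySem.Dict.empty (fun d => d.insert c idx)
     | none => map) = pvSetField map m f idx := by
  by_cases h1 : f = "ALOTTED"
  · simp [pvFields, PySem.Dict.get?_mk_cons, pvSetField, h1]
  · by_cases h2 : f = "ENGAGED"
    · simp [pvFields, PySem.Dict.get?_mk_cons, pvSetField, h2]
    · by_cases h3 : f = "GAP"
      · simp [pvFields, PySem.Dict.get?_mk_cons, pvSetField, h3]
      · simp [pvFields, PySem.Dict.get?, pvSetField, h1, h2, h3, Ne.symm h1, Ne.symm h2,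
          Ne.symm h3]

theorem pvAStep_month_old (map : PySem.Dict String (PySem.Dict String Int)) (cur : Option String)
    (s idx : Int) (mc fc : String) (hm : PySem.Str.strip mc ≠ "")
    (hc : map.contains (PySem.Str.upper (PySem.Str.strip mc)) = true)
    (hMne : PySem.Str.upper (PySem.Str.strip mc) ≠ "") :
    pvAStep (map, cur, some s) (idx, mc, fc)
      = (pvSetField map (PySem.Str.upper (PySem.Str.strip mc))
          (PySem.Str.upper (PySem.Str.strip fc)) idx,
         some (PySem.Str.upper (PySem.Str.strip mc)), some s) := by
  simp [pvAStep, hm, hc, hMne]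

theorem pvAStep_month_new (map : PySem.Dict String (PySem.Dict String Int)) (cur : Option String)
    (mst : Option Int) (idx : Int) (mc fc : String) (hm : PySem.Str.strip mc ≠ "")
    (hc : map.contains (PySem.Str.upper (PySem.Str.strip mc)) = false)
    (hMne : PySem.Str.upper (PySem.Str.strip mc) ≠ "") :
    pvAStep (map, cur, mst) (idx, mc, fc)
      = (pvSetField (map.insert (PySem.Str.upper (PySem.Str.strip mc)) PySem.Dict.empty)
          (PySem.Str.upper (PySem.Str.strip mc)) (PySem.Str.upper (PySem.Str.strip fc)) idx,
         some (PySem.Str.upper (PySem.Str.strip mc)), some idx) := by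
  simp [pvAStep, hm, hc, hMne]

theorem pvAStep_blank_none (map : PySem.Dict String (PySem.Dict String Int)) (mst : Option Int)
    (idx : Int) (mc fc : String) (hm : PySem.Str.strip mc = "") :
    pvAStep (map, none, mst) (idx, mc, fc) = (map, none, mst) := by
  simp [pvAStep, hm]

theorem pvAStep_blank_some (map : PySem.Dict String (PySem.Dict String Int)) (m : String)
    (s idx : Int) (mc fc : String) (hm : PySem.Str.strip mc = "") (hne : m ≠ "") :
    pvAStep (map, some m, some s) (idx, mc, fc)
      = (pvSetField map m (PySem.Str.upper (PySem.Str.strip fc)) idx, some m, some s) := by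
  simp [pvAStep, hm, hne]

theorem pvBStep_none (map : PySem.Dict String (PySem.Dict String Int)) (idx : Int) (fc : String) :
    pvBStep map (idx, none, fc) = map := rfl

theorem pvBStep_some_old (map : PySem.Dict String (PySem.Dict String Int)) (m : String)
    (idx : Int) (fc : String) (hc : map.contains m = true) :
    pvBStep map (idx, some m, fc)
      = pvSetField map m (PySem.Str.upper (PySem.Str.strip fc)) idx := by
  simp only [pvBStep]
  rw [if_pos hc]
  generalize PySem.Str.upper (PySem.Str.strip fc) = f
  exact pvField_eq map m idx f

theorem pvBStep_some_new (map : PySem.Dict String (PySem.Dict String Int)) (m : String)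
    (idx : Int) (fc : String) (hc : map.contains m = false) :
    pvBStep map (idx, some m, fc)
      = pvSetField (map.insert m PySem.Dict.empty) m (PySem.Str.upper (PySem.Str.strip fc)) idx := by
  simp only [pvBStep]
  rw [if_neg (by simp [hc])]
  generalize PySem.Str.upper (PySem.Str.strip fc) = f
  exact pvField_eq (map.insert m PySem.Dict.empty) m idx f

theorem pvMain (hs : List String) : ∀ (fs : List String) (idx : Int)
    (map : PySem.Dict String (PySem.Dict String Int)) (cur : Option String) (mst : Option Int),
    pvInv map cur mst →
    ((PySem.List.enumerate (hs.zip fs) idx).foldl pvAStep (map, cur, mst)).1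
      = (PySem.List.enumerate ((pvResolve hs cur).zip fs) idx).foldl pvBStep map := by
  induction hs with
  | nil =>
    intro fs idx map cur mst _
    simp [pvResolve]
  | cons mc hs ih =>
    intro fs idx map cur mst hinv
    cases fs with
    | nil => simp [pvResolve]
    | cons fc fs =>
      by_cases hm : PySem.Str.strip mc ≠ ""
      · -- month cell nonempty: month becomes M
        have hMne : PySem.Str.upper (PySem.Str.strip mc) ≠ "" := pvUpper_ne_empty _ hm
        have hres : pvResolve (mc :: hs) cur
            = some (PySem.Str.upper (PySem.Str.strip mc))
              :: pvResolve hs (some (PySem.Str.upper (PySem.Str.strip mc))) := by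
          simp [pvResolve, hm]
        by_cases hc : map.contains (PySem.Str.upper (PySem.Str.strip mc)) = true
        · -- month already a key; month_start_idx must already be set
          obtain ⟨m0, rfl⟩ : ∃ m0, cur = some m0 := by
            cases cur with
            | none =>
              exfalso
              simp only [pvInv] at hinv
              rw [hinv.1] at hc
              simp [PySem.Dict.contains_empty] at hc
            | some m0 => exact ⟨m0, rfl⟩
          simp only [pvInv] at hinv
          obtain ⟨hne0, hc0, hsome⟩ := hinv
          obtain ⟨s, rfl⟩ : ∃ s, mst = some s := by
            cases mst with
            | none => simp at hsome
            | some s => exact ⟨s, rfl⟩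
          rw [List.zip_cons_cons, PySem.List.enumerate_cons, List.foldl_cons,
            pvAStep_month_old map (some m0) s idx mc fc hm hc hMne, hres,
            List.zip_cons_cons, PySem.List.enumerate_cons, List.foldl_cons,
            pvBStep_some_old map _ idx fc hc]
          exact ih fs (idx + 1) _ _ (some s)
            ⟨hMne, pvContains_setField _ _ _ _ _ hc, rfl⟩
        · -- fresh month: insert empty dict, set month_start_idx
          have hc' : map.contains (PySem.Str.upper (PySem.Str.strip mc)) = false := by
            simpa using hc
          rw [List.zip_cons_cons, PySem.List.enumerate_cons, List.foldl_cons,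
            pvAStep_month_new map cur mst idx mc fc hm hc' hMne, hres,
            List.zip_cons_cons, PySem.List.enumerate_cons, List.foldl_cons,
            pvBStep_some_new map _ idx fc hc']
          exact ih fs (idx + 1) _ _ (some idx)
            ⟨hMne, pvContains_setField _ _ _ _ _ (PySem.Dict.contains_insert_self _ _ _), rfl⟩
      · -- empty month cell: carry the state
        rw [not_not] at hm
        have hres : pvResolve (mc :: hs) cur = cur :: pvResolve hs cur := by
          simp [pvResolve, hm]
        cases cur with
        | none =>
          simp only [pvInv] at hinv
          obtain ⟨rfl, rfl⟩ := hinv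
          rw [List.zip_cons_cons, PySem.List.enumerate_cons, List.foldl_cons,
            pvAStep_blank_none _ _ idx mc fc hm, hres,
            List.zip_cons_cons, PySem.List.enumerate_cons, List.foldl_cons, pvBStep_none]
          exact ih fs (idx + 1) _ none none ⟨rfl, rfl⟩
        | some m0 =>
          simp only [pvInv] at hinv
          obtain ⟨hne, hcont, hsome⟩ := hinv
          obtain ⟨s, rfl⟩ : ∃ s, mst = some s := by
            cases mst with
            | none => simp at hsome
            | some s => exact ⟨s, rfl⟩
          rw [List.zip_cons_cons, PySem.List.enumerate_cons, List.foldl_cons,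
            pvAStep_blank_some map m0 s idx mc fc hm hne, hres,
            List.zip_cons_cons, PySem.List.enumerate_cons, List.foldl_cons,
            pvBStep_some_old map m0 idx fc hcont]
          exact ih fs (idx + 1) _ _ (some s)
            ⟨hne, pvContains_setField _ _ _ _ _ hcont, rfl⟩

-- ===== VERDICT (by name: the statement is the Claim_ definition above) =====
theorem parse_month_field_columns_spec : Claim_equal_parse_month_field_columns := by
  intro header_row field_row _
  unfold Spec_parse_month_field_columns
  exact congrArg (fun d : PySem.Dict String (PySem.Dict String Int) =>
      d.items.map (fun p => (p.1, p.2.items)))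
    (pvMain (PySem.List.slice header_row (some 2) none)
      (PySem.List.slice field_row (some 2) none) 2 PySem.Dict.empty none none ⟨rfl, rfl⟩)
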